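-- pv_equiv track=rewrite | github.com/jenilpatel252525-cyber/python-practice | Project/Leetcode/62.py | longest_subarray_xor_less_than_k
-- ===== SOURCE A (Python) =====
-- def longest_subarray_xor_less_than_k(a, K):
--     n = len(a)
--     prefix_xor = [0] * (n + 1)
--
--     for i in range(n):
--         prefix_xor[i + 1] = prefix_xor[i] ^ a[i]
--
--     max_len = 0
--
--     # Check all subarrays
--     for i in range(n):
--         for j in range(i + 1, n + 1):
--             xor_val = prefix_xor[j] ^ prefix_xor[i]
--             if xor_val < K:
--                 max_len = max(max_len, j - i)
--
--     return max_len
-- ===== SOURCE B (Python) =====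
-- # Binary trie of prefix-XOR keys (33-bit two's-complement, offset by 2**32) storing the
-- # minimal prefix index; each position j queries the earliest i with prefix[i]^prefix[j] < K.
-- BITS = 33
-- OFF = 1 << (BITS - 1)
--
--
-- def _insert(node, key, b, idx):
--     # persistent insert of (key, idx) along the b high-to-low bits; every node keeps min index
--     if node is None:
--         node = {'mn': idx, 0: None, 1: None}
--     else:
--         node = {'mn': min(node['mn'], idx), 0: node[0], 1: node[1]}
--     if b:
--         bit = (key >> (b - 1)) & 1
--         node[bit] = _insert(node[bit], key, b - 1, idx)
--     return node
--
--
-- def _root_mn(node):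
--     return None if node is None else node['mn']
--
--
-- def _opt_min(x, y):
--     if x is None:
--         return y
--     if y is None:
--         return x
--     return min(x, y)
--
--
-- def _query(node, t, k, b):
--     # min index among stored keys v with (v ^ t) < k, comparing the b low bits
--     if node is None or b == 0:
--         return None
--     tb = (t >> (b - 1)) & 1
--     kb = (k >> (b - 1)) & 1
--     same = node[tb]
--     diff = node[1 - tb]
--     if kb:
--         return _opt_min(_root_mn(same), _query(diff, t, k, b - 1))
--     return _query(same, t, k, b - 1)
--
--
-- def longest_subarray_xor_less_than_k(a, K):
--     bound = K + OFF
--     root = _insert(None, OFF, BITS, 0)  # prefix xor 0 at index 0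
--     px = 0
--     ans = 0
--     j = 0
--     for v in a:
--         px ^= v
--         key = px + OFF
--         j += 1
--         i = _query(root, key ^ OFF, bound, BITS)
--         if i is not None and j - i > ans:
--             ans = j - i
--         root = _insert(root, key, BITS, j)
--     return ans
-- ===== Notes on version B (the rewrite author's own statement) =====
-- stated objective: faster
-- what changed: A checks all O(n^2) prefix pairs; B builds a 33-bit binary trie over two's-complement-offset prefix-XOR keys that stores the minimal prefix index, and for each position queries in O(33) the earliest index whose prefix XOR with the current one is below K.
import Mathlib
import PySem

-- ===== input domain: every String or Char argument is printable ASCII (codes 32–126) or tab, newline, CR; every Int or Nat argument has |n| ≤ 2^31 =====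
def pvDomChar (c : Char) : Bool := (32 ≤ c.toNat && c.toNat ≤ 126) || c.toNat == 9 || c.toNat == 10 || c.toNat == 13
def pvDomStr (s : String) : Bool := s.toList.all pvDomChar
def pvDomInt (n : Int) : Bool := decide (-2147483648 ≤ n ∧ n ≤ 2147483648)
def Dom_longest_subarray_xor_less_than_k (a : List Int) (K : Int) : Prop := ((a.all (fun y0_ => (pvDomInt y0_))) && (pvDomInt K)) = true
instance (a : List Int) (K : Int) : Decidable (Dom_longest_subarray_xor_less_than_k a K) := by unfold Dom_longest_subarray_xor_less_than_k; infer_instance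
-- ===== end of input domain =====

-- B replaces A's O(n^2) scan over all prefix pairs by a 33-bit binary trie of prefix-XOR keys
-- (two's-complement offset encoding) storing minimal indices: one O(bit-width) query per position.

-- ===== PORT A =====
-- literal transliteration of A: prefix table built by assignment into [0]*(n+1), then the
-- quadratic double loop over all (i, j) pairs.
def longest_subarray_xor_less_than_k (a : List Int) (K : Int) : Int :=
  let n : Int := PySem.List.len a
  let prefix_xor : List Int :=
    (PySem.List.pyRange 0 n).foldl
      (fun px i =>
        PySem.List.pySetD px (i + 1)
          (PySem.Int.bxor (PySem.List.pyGetD px i 0) (PySem.List.pyGetD a i 0)))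
      (List.replicate (n + 1).toNat 0)
  (PySem.List.pyRange 0 n).foldl
    (fun max_len i =>
      (PySem.List.pyRange (i + 1) (n + 1)).foldl
        (fun max_len j =>
          if PySem.Int.bxor (PySem.List.pyGetD prefix_xor j 0) (PySem.List.pyGetD prefix_xor i 0) < K then
            max max_len (j - i)
          else max_len)
        max_len)
    0

-- ===== PORT B =====
-- binary trie over the 33 bits of key = prefix_xor + 2^32; each node stores the minimal
-- inserted index (Source B's persistent dict nodes {'mn', 0, 1} become an inductive tree).
inductive PXTrie where
  | nil : PXTrie
  | node : Nat → PXTrie → PXTrie → PXTrie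
deriving DecidableEq, Repr

-- Source B _insert: refresh the node's min index, then (if bits remain) insert into the chosen child
def pxInsert : PXTrie → Nat → Nat → Nat → PXTrie
  | t, _, 0, idx =>
    match t with
    | .nil => .node idx .nil .nil
    | .node mn c0 c1 => .node (min mn idx) c0 c1
  | t, key, b + 1, idx =>
    match t with
    | .nil =>
      if key.testBit b then .node idx .nil (pxInsert .nil key b idx)
      else .node idx (pxInsert .nil key b idx) .nil
    | .node mn c0 c1 =>
      if key.testBit b then .node (min mn idx) c0 (pxInsert c1 key b idx)
      else .node (min mn idx) (pxInsert c0 key b idx) c1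

-- Source B _root_mn
def pxRootMn : PXTrie → Option Nat
  | .nil => none
  | .node mn _ _ => some mn

-- Source B _opt_min
def pxOptMin : Option Nat → Option Nat → Option Nat
  | none, r => r
  | l, none => l
  | some x, some y => some (min x y)

-- Source B _query: min stored index whose key v satisfies (v ^ t) < k on the b low bits
def pxQuery : PXTrie → Nat → Nat → Nat → Option Nat
  | .nil, _, _, _ => none
  | .node _ _ _, _, _, 0 => none
  | .node _ c0 c1, t, k, b + 1 =>
    let same := if t.testBit b then c1 else c0
    let diff := if t.testBit b then c0 else c1
    if k.testBit b then pxOptMin (pxRootMn same) (pxQuery diff t k b)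
    else pxQuery same t k b

def longest_subarray_xor_less_than_k_alt (a : List Int) (K : Int) : Int :=
  let bound : Nat := (K + 4294967296).toNat
  let st := a.foldl
    (fun (st : PXTrie × Int × Nat × Int) v =>
      let px := PySem.Int.bxor st.2.1 v
      let key := (px + 4294967296).toNat
      let j := st.2.2.1 + 1
      let ans :=
        match pxQuery st.1 (key ^^^ 4294967296) bound 33 with
        | some i => if (j : Int) - (i : Int) > st.2.2.2 then (j : Int) - (i : Int) else st.2.2.2
        | none => st.2.2.2
      (pxInsert st.1 key 33 j, px, j, ans))
    (pxInsert PXTrie.nil 4294967296 33 0, 0, 0, 0)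
  st.2.2.2

-- ===== PRECONDITION & SPEC =====
def Spec_longest_subarray_xor_less_than_k (a : List Int) (K : Int) (out : Int) : Prop := out = longest_subarray_xor_less_than_k_alt a K
instance (a : List Int) (K : Int) (out : Int) : Decidable (Spec_longest_subarray_xor_less_than_k a K out) := by unfold Spec_longest_subarray_xor_less_than_k; infer_instance

-- ===== CLAIM (what is proved, stated in full; the proofs are below) =====
def Claim_equal_longest_subarray_xor_less_than_k : Prop := ∀ (a : List Int) (K : Int), Dom_longest_subarray_xor_less_than_k a K → Spec_longest_subarray_xor_less_than_k a K (longest_subarray_xor_less_than_k a K)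

-- ===== LEMMAS AND PROOFS =====

-- the list of prefix xors [px_0, …, px_n] and notation for the pair condition
def pxs (a : List Int) : List Int := a.scanl (fun x y => PySem.Int.bxor x y) 0
def pxv (a : List Int) (i : Nat) : Int := (pxs a).getD i 0

def goodb (a : List Int) (K : Int) (i j : Nat) : Bool :=
  decide (PySem.Int.bxor (pxv a j) (pxv a i) < K)

def keyOf (a : List Int) (i : Nat) : Nat := (pxv a i + 2 ^ 32).toNat

def minGood (a : List Int) (K : Int) (j : Nat) : Option Nat :=
  ((List.range j).filter (fun i => goodb a K i j)).min?

def vj (a : List Int) (K : Int) (j : Nat) : Nat :=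
  match minGood a K j with
  | some i => j - i
  | none => 0

-- the common specification value: the longest good subarray length
def specN (a : List Int) (K : Int) : Nat :=
  (Finset.range (a.length + 1)).sup fun j =>
    (Finset.range j).sup fun i => if goodb a K i j then j - i else 0

def pxBounded (a : List Int) : Prop := ∀ x ∈ a, -2 ^ 31 ≤ x ∧ x ≤ 2 ^ 31

def sKeys (a : List Int) (m : Nat) : List (Nat × Nat) :=
  (List.range m).map fun i => (keyOf a i, i)

-- ---- generic Nat bit lemmas ----
theorem xor_two_pow_of_lt {k y : Nat} (h : y < 2 ^ k) : 2 ^ k ^^^ y = 2 ^ k + y := by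
  induction k generalizing y with
  | zero => interval_cases y <;> decide
  | succ k ih =>
    have h2 : (2 ^ (k+1) ^^^ y) / 2 = 2 ^ k ^^^ y / 2 := by
      rw [Nat.xor_div_two]; congr 1; omega
    have h3 : (2 ^ (k+1) ^^^ y) % 2 = (2 ^ (k+1) + y) % 2 := Nat.xor_mod_two_eq
    have h4 : 2 ^ k ^^^ y / 2 = 2 ^ k + y / 2 := ih (by omega)
    omega

theorem xor_two_pow_sub_one_of_lt {k y : Nat} (h : y < 2 ^ k) :
    (2 ^ k - 1) ^^^ y = 2 ^ k - 1 - y := by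
  induction k generalizing y with
  | zero => interval_cases y <;> decide
  | succ k ih =>
    have h2 : ((2 ^ (k+1) - 1) ^^^ y) / 2 = (2 ^ k - 1) ^^^ y / 2 := by
      rw [Nat.xor_div_two]; congr 1; omega
    have h3 : ((2 ^ (k+1) - 1) ^^^ y) % 2 = (2 ^ (k+1) - 1 + y) % 2 := Nat.xor_mod_two_eq
    have h4 : (2 ^ k - 1) ^^^ y / 2 = 2 ^ k - 1 - y / 2 := ih (by omega)
    have h5 : 2 ^ k ≤ 2 ^ (k+1) := Nat.pow_le_pow_right (by norm_num) (by omega)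
    omega

theorem mod_two_pow_succ_lt_iff (x k b : Nat) :
    x % 2 ^ (b + 1) < k % 2 ^ (b + 1) ↔
      ((x.testBit b = false ∧ k.testBit b = true) ∨
        (x.testBit b = k.testBit b ∧ x % 2 ^ b < k % 2 ^ b)) := by
  have hx : x % (2 ^ b * 2) = x % 2 ^ b + 2 ^ b * (x / 2 ^ b % 2) := Nat.mod_mul
  have hk : k % (2 ^ b * 2) = k % 2 ^ b + 2 ^ b * (k / 2 ^ b % 2) := Nat.mod_mul
  have ex : x.testBit b = decide (x / 2 ^ b % 2 = 1) := Nat.testBit_eq_decide_div_mod_eq ..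
  have ek : k.testBit b = decide (k / 2 ^ b % 2 = 1) := Nat.testBit_eq_decide_div_mod_eq ..
  have hpb : 0 < 2 ^ b := Nat.two_pow_pos b
  have hlt : x % 2 ^ b < 2 ^ b := Nat.mod_lt _ hpb
  have hlt2 : k % 2 ^ b < 2 ^ b := Nat.mod_lt _ hpb
  rw [pow_succ] at *
  rw [hx, hk, ex, ek]
  rcases Nat.mod_two_eq_zero_or_one (x / 2 ^ b) with h1 | h1 <;>
    rcases Nat.mod_two_eq_zero_or_one (k / 2 ^ b) with h2 | h2 <;>
      simp [h1, h2] <;> omega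

-- ---- Int key lemmas ----
theorem bxor_range {v x : Int} (hv : -2 ^ 32 ≤ v ∧ v < 2 ^ 32) (hx : -2 ^ 32 ≤ x ∧ x < 2 ^ 32) :
    -2 ^ 32 ≤ PySem.Int.bxor v x ∧ PySem.Int.bxor v x < 2 ^ 32 := by
  unfold PySem.Int.bxor
  split_ifs with h1 h2 h2 <;>
  · first
    | (have := Nat.xor_lt_two_pow (x := v.toNat) (y := x.toNat) (n := 32) (by omega) (by omega); omega)
    | (have := Nat.xor_lt_two_pow (x := v.toNat) (y := (-x-1).toNat) (n := 32) (by omega) (by omega); omega)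
    | (have := Nat.xor_lt_two_pow (x := (-v-1).toNat) (y := x.toNat) (n := 32) (by omega) (by omega); omega)
    | (have := Nat.xor_lt_two_pow (x := (-v-1).toNat) (y := (-x-1).toNat) (n := 32) (by omega) (by omega); omega)

theorem key_xor_eq {v x : Int} (hv : -2 ^ 32 ≤ v ∧ v < 2 ^ 32) (hx : -2 ^ 32 ≤ x ∧ x < 2 ^ 32) :
    (v + 2 ^ 32).toNat ^^^ ((x + 2 ^ 32).toNat ^^^ 2 ^ 32) = (PySem.Int.bxor v x + 2 ^ 32).toNat := by
  rcases le_or_gt 0 v with hv0 | hv0 <;> rcases le_or_gt 0 x with hx0 | hx0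
  · -- v ≥ 0, x ≥ 0
    have hbx : PySem.Int.bxor v x = ((v.toNat ^^^ x.toNat : Nat) : Int) := by
      simp [PySem.Int.bxor, hv0, hx0]
    have hxx : v.toNat ^^^ x.toNat < 2 ^ 32 := Nat.xor_lt_two_pow (by omega) (by omega)
    have hA : (v + 2 ^ 32).toNat = 2 ^ 32 ^^^ v.toNat := by
      rw [xor_two_pow_of_lt (by omega)]; omega
    have hB : (x + 2 ^ 32).toNat = 2 ^ 32 ^^^ x.toNat := by
      rw [xor_two_pow_of_lt (by omega)]; omega
    have hC : (PySem.Int.bxor v x + 2 ^ 32).toNat = 2 ^ 32 ^^^ (v.toNat ^^^ x.toNat) := by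
      rw [xor_two_pow_of_lt hxx, hbx]; omega
    rw [hA, hB, hC]
    simp [Nat.xor_assoc, Nat.xor_comm, Nat.xor_left_comm]
  · -- v ≥ 0, x < 0
    have hbx : PySem.Int.bxor v x = -((v.toNat ^^^ (-x-1).toNat : Nat) : Int) - 1 := by
      unfold PySem.Int.bxor; rw [if_pos hv0, if_neg (by omega : ¬ (0:Int) ≤ x)]
    have hxx : v.toNat ^^^ (-x-1).toNat < 2 ^ 32 := Nat.xor_lt_two_pow (by omega) (by omega)
    have hA : (v + 2 ^ 32).toNat = 2 ^ 32 ^^^ v.toNat := by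
      rw [xor_two_pow_of_lt (by omega)]; omega
    have hB : (x + 2 ^ 32).toNat = (2 ^ 32 - 1) ^^^ (-x-1).toNat := by
      rw [xor_two_pow_sub_one_of_lt (by omega)]; omega
    have hC : (PySem.Int.bxor v x + 2 ^ 32).toNat = (2 ^ 32 - 1) ^^^ (v.toNat ^^^ (-x-1).toNat) := by
      rw [xor_two_pow_sub_one_of_lt hxx, hbx]; omega
    rw [hA, hB, hC]
    simp [Nat.xor_assoc, Nat.xor_comm, Nat.xor_left_comm]
  · -- v < 0, x ≥ 0
    have hbx : PySem.Int.bxor v x = -(((-v-1).toNat ^^^ x.toNat : Nat) : Int) - 1 := by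
      unfold PySem.Int.bxor; rw [if_neg (by omega : ¬ (0:Int) ≤ v), if_pos hx0]
    have hxx : (-v-1).toNat ^^^ x.toNat < 2 ^ 32 := Nat.xor_lt_two_pow (by omega) (by omega)
    have hA : (v + 2 ^ 32).toNat = (2 ^ 32 - 1) ^^^ (-v-1).toNat := by
      rw [xor_two_pow_sub_one_of_lt (by omega)]; omega
    have hB : (x + 2 ^ 32).toNat = 2 ^ 32 ^^^ x.toNat := by
      rw [xor_two_pow_of_lt (by omega)]; omega
    have hC : (PySem.Int.bxor v x + 2 ^ 32).toNat = (2 ^ 32 - 1) ^^^ ((-v-1).toNat ^^^ x.toNat) := by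
      rw [xor_two_pow_sub_one_of_lt hxx, hbx]; omega
    rw [hA, hB, hC]
    simp [Nat.xor_assoc, Nat.xor_comm, Nat.xor_left_comm]
  · -- v < 0, x < 0
    have hbx : PySem.Int.bxor v x = (((-v-1).toNat ^^^ (-x-1).toNat : Nat) : Int) := by
      unfold PySem.Int.bxor; rw [if_neg (by omega : ¬ (0:Int) ≤ v), if_neg (by omega : ¬ (0:Int) ≤ x)]
    have hxx : (-v-1).toNat ^^^ (-x-1).toNat < 2 ^ 32 := Nat.xor_lt_two_pow (by omega) (by omega)
    have hA : (v + 2 ^ 32).toNat = (2 ^ 32 - 1) ^^^ (-v-1).toNat := by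
      rw [xor_two_pow_sub_one_of_lt (by omega)]; omega
    have hB : (x + 2 ^ 32).toNat = (2 ^ 32 - 1) ^^^ (-x-1).toNat := by
      rw [xor_two_pow_sub_one_of_lt (by omega)]; omega
    have hC : (PySem.Int.bxor v x + 2 ^ 32).toNat = 2 ^ 32 ^^^ ((-v-1).toNat ^^^ (-x-1).toNat) := by
      rw [xor_two_pow_of_lt hxx, hbx]; omega
    rw [hA, hB, hC]
    simp [Nat.xor_assoc, Nat.xor_comm, Nat.xor_left_comm]

theorem key_cond_iff {v x K : Int} (hv : -2 ^ 32 ≤ v ∧ v < 2 ^ 32) (hx : -2 ^ 32 ≤ x ∧ x < 2 ^ 32)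
    (hK : -2 ^ 31 ≤ K ∧ K ≤ 2 ^ 31) :
    ((v + 2 ^ 32).toNat ^^^ ((x + 2 ^ 32).toNat ^^^ 2 ^ 32) < (K + 2 ^ 32).toNat ↔
      PySem.Int.bxor v x < K) := by
  rw [key_xor_eq hv hx]
  have := bxor_range hv hx
  omega

-- ---- trie invariant ----
def PXInv : Nat → List (Nat × Nat) → PXTrie → Prop
  | _, S, .nil => S = []
  | 0, S, .node mn c0 c1 => S ≠ [] ∧ (S.map Prod.snd).min? = some mn ∧ c0 = .nil ∧ c1 = .nil
  | b + 1, S, .node mn c0 c1 => S ≠ [] ∧ (S.map Prod.snd).min? = some mn ∧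
      PXInv b (S.filter fun p => !p.1.testBit b) c0 ∧ PXInv b (S.filter fun p => p.1.testBit b) c1

theorem pxOptMin_comm (x y : Option Nat) : pxOptMin x y = pxOptMin y x := by
  cases x <;> cases y <;> simp [pxOptMin, Nat.min_comm]

theorem min?_append (l1 l2 : List Nat) : (l1 ++ l2).min? = pxOptMin l1.min? l2.min? := by
  induction l1 with
  | nil => simp [pxOptMin]
  | cons x l1 ih =>
    rw [List.cons_append, List.min?_cons, List.min?_cons, ih]
    cases h1 : l1.min? <;> cases h2 : l2.min? <;>
      simp [pxOptMin, Option.elim, Nat.min_assoc]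

theorem min?_perm {l1 l2 : List Nat} (h : l1.Perm l2) : l1.min? = l2.min? := by
  induction h with
  | nil => rfl
  | cons x _ ih => rw [List.min?_cons, List.min?_cons, ih]
  | swap x y l =>
    rw [List.min?_cons, List.min?_cons, List.min?_cons, List.min?_cons]
    cases h : l.min? <;> simp [Option.elim, Nat.min_comm, Nat.min_assoc, Nat.min_left_comm]
  | trans _ _ ih1 ih2 => rw [ih1, ih2]

theorem inv_rootMn {b : Nat} {S : List (Nat × Nat)} {t : PXTrie} (h : PXInv b S t) :
    pxRootMn t = (S.map Prod.snd).min? := by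
  cases t with
  | nil => cases b <;> simp_all [PXInv, pxRootMn]
  | node mn c0 c1 => cases b <;> simp_all [PXInv, pxRootMn]

theorem inv_insert {b : Nat} {S : List (Nat × Nat)} {t : PXTrie} (h : PXInv b S t)
    (key idx : Nat) : PXInv b (S ++ [(key, idx)]) (pxInsert t key b idx) := by
  induction b generalizing S t with
  | zero =>
    cases t with
    | nil => simp_all [PXInv, pxInsert]
    | node mn c0 c1 =>
      obtain ⟨hne, hmn, hc0, hc1⟩ := h
      refine ⟨by simp, ?_, hc0, hc1⟩
      rw [List.map_append, min?_append, hmn]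
      simp [pxOptMin]
  | succ b ih =>
    cases t with
    | nil =>
      subst h
      have hnil : ∀ b', PXInv b' [] PXTrie.nil := by intro b'; cases b' <;> simp [PXInv]
      have hone : PXInv b [(key, idx)] (pxInsert PXTrie.nil key b idx) := by
        simpa using ih (hnil b)
      by_cases hb : key.testBit b
      · simp only [pxInsert, hb, if_true]
        exact ⟨by simp, by simp,
          by simpa [List.filter_cons, hb] using hnil b,
          by simpa [List.filter_cons, hb] using hone⟩
      · simp only [pxInsert, hb, if_false]
        exact ⟨by simp, by simp,
          by simpa [List.filter_cons, hb] using hone,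
          by simpa [List.filter_cons, hb] using hnil b⟩
    | node mn c0 c1 =>
      obtain ⟨hne, hmn, h0, h1⟩ := h
      have hmin : ((S ++ [(key, idx)]).map Prod.snd).min? = some (min mn idx) := by
        rw [List.map_append, min?_append, hmn]; simp [pxOptMin]
      by_cases hb : key.testBit b <;>
        simp only [pxInsert, hb, if_true, if_false]
      · refine ⟨by simp, hmin, ?_, ?_⟩
        · rw [List.filter_append]; simpa [hb] using h0
        · have := ih h1
          rw [List.filter_append]; simpa [hb] using this
      · refine ⟨by simp, hmin, ?_, ?_⟩
        · have := ih h0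
          rw [List.filter_append]; simpa [hb] using this
        · rw [List.filter_append]; simpa [hb] using h1

theorem filter_partition_perm (S : List (Nat × Nat)) (c : Nat × Nat → Bool) (b : Nat) :
    (((S.filter fun p => !p.1.testBit b).filter c) ++ ((S.filter fun p => p.1.testBit b).filter c)).Perm
      (S.filter c) := by
  have hp := List.filter_append_perm (fun p : Nat × Nat => !p.1.testBit b) S
  have hp2 : ((S.filter fun p => !p.1.testBit b) ++ (S.filter fun p => p.1.testBit b)).Perm S := by
    simpa using hp
  simpa [List.filter_append] using hp2.filter c

theorem query_correct {b : Nat} {S : List (Nat × Nat)} {t : PXTrie} (h : PXInv b S t)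
    (tq k : Nat) :
    pxQuery t tq k b =
      ((S.filter fun p => decide ((p.1 ^^^ tq) % 2 ^ b < k % 2 ^ b)).map Prod.snd).min? := by
  induction b generalizing S t with
  | zero =>
    cases t with
    | nil => subst h; simp [pxQuery]
    | node mn c0 c1 => simp [pxQuery, Nat.mod_one]
  | succ b ih =>
    cases t with
    | nil => subst h; simp [pxQuery]
    | node mn c0 c1 =>
      obtain ⟨hne, hmn, h0, h1⟩ := h
      have hRHS :
          (((S.filter fun p => decide ((p.1 ^^^ tq) % 2 ^ (b+1) < k % 2 ^ (b+1))).map Prod.snd)).min?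
            = pxOptMin
              ((((S.filter fun p => !p.1.testBit b).filter
                  fun p => decide ((p.1 ^^^ tq) % 2 ^ (b+1) < k % 2 ^ (b+1))).map Prod.snd).min?)
              ((((S.filter fun p => p.1.testBit b).filter
                  fun p => decide ((p.1 ^^^ tq) % 2 ^ (b+1) < k % 2 ^ (b+1))).map Prod.snd).min?) := by
        rw [← min?_perm ((filter_partition_perm S _ b).map Prod.snd), List.map_append, min?_append]
      have hmem0 : ∀ p ∈ (S.filter fun p => !p.1.testBit b), p.1.testBit b = false := by
        intro p hp; simpa using (List.mem_filter.mp hp).2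
      have hmem1 : ∀ p ∈ (S.filter fun p => p.1.testBit b), p.1.testBit b = true := by
        intro p hp; exact (List.mem_filter.mp hp).2
      have hcond : ∀ (p : Nat × Nat),
          (decide ((p.1 ^^^ tq) % 2 ^ (b+1) < k % 2 ^ (b+1)) : Bool)
            = ((!(p.1.testBit b ^^ tq.testBit b) && k.testBit b)
               || ((p.1.testBit b ^^ tq.testBit b) == k.testBit b)
                  && decide ((p.1 ^^^ tq) % 2 ^ b < k % 2 ^ b)) := by
        intro p
        have := mod_two_pow_succ_lt_iff (p.1 ^^^ tq) k b
        rw [Nat.testBit_xor] at this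
        rcases hb1 : p.1.testBit b <;> rcases hb2 : tq.testBit b <;> rcases hb3 : k.testBit b <;>
          simp [hb1, hb2, hb3] at this ⊢ <;> simp [this]
      rcases htb : tq.testBit b <;> rcases hkb : k.testBit b
      · -- tb = false, kb = false : recurse into c0, S1 contributes nothing
        have e0 : ((S.filter fun p => !p.1.testBit b).filter
            fun p => decide ((p.1 ^^^ tq) % 2 ^ (b+1) < k % 2 ^ (b+1)))
            = ((S.filter fun p => !p.1.testBit b).filter
                fun p => decide ((p.1 ^^^ tq) % 2 ^ b < k % 2 ^ b)) :=
          List.filter_congr (fun p hp => by rw [hcond p, hmem0 p hp, htb, hkb]; simp)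
        have e1 : ((S.filter fun p => p.1.testBit b).filter
            fun p => decide ((p.1 ^^^ tq) % 2 ^ (b+1) < k % 2 ^ (b+1))) = [] :=
          List.filter_eq_nil_iff.mpr
            (fun p hp => by rw [hcond p, hmem1 p hp, htb, hkb]; simp)
        rw [hRHS, e0, e1, pxQuery]
        simp only [htb, hkb, if_false, Bool.false_eq_true, ite_false]
        rw [ih h0]
        cases (((S.filter fun p => !p.1.testBit b).filter
            fun p => decide ((p.1 ^^^ tq) % 2 ^ b < k % 2 ^ b)).map Prod.snd).min? <;>
          simp [pxOptMin]
      · -- tb = false, kb = true : all of S0 qualifies, recurse into c1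
        have e0 : ((S.filter fun p => !p.1.testBit b).filter
            fun p => decide ((p.1 ^^^ tq) % 2 ^ (b+1) < k % 2 ^ (b+1)))
            = (S.filter fun p => !p.1.testBit b) :=
          List.filter_eq_self.mpr
            (fun p hp => by rw [hcond p, hmem0 p hp, htb, hkb]; simp)
        have e1 : ((S.filter fun p => p.1.testBit b).filter
            fun p => decide ((p.1 ^^^ tq) % 2 ^ (b+1) < k % 2 ^ (b+1)))
            = ((S.filter fun p => p.1.testBit b).filter
                fun p => decide ((p.1 ^^^ tq) % 2 ^ b < k % 2 ^ b)) :=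
          List.filter_congr (fun p hp => by rw [hcond p, hmem1 p hp, htb, hkb]; simp)
        rw [hRHS, e0, e1, pxQuery]
        simp only [htb, hkb, if_false, if_true, Bool.false_eq_true, ite_false, ite_true]
        rw [ih h1, inv_rootMn h0]
      · -- tb = true, kb = false : recurse into c1, S0 contributes nothing
        have e0 : ((S.filter fun p => !p.1.testBit b).filter
            fun p => decide ((p.1 ^^^ tq) % 2 ^ (b+1) < k % 2 ^ (b+1))) = [] :=
          List.filter_eq_nil_iff.mpr
            (fun p hp => by rw [hcond p, hmem0 p hp, htb, hkb]; simp)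
        have e1 : ((S.filter fun p => p.1.testBit b).filter
            fun p => decide ((p.1 ^^^ tq) % 2 ^ (b+1) < k % 2 ^ (b+1)))
            = ((S.filter fun p => p.1.testBit b).filter
                fun p => decide ((p.1 ^^^ tq) % 2 ^ b < k % 2 ^ b)) :=
          List.filter_congr (fun p hp => by rw [hcond p, hmem1 p hp, htb, hkb]; simp)
        rw [hRHS, e0, e1, pxQuery]
        simp only [htb, hkb, if_true, if_false, Bool.false_eq_true, ite_false, ite_true]
        rw [ih h1]
        simp [pxOptMin]
      · -- tb = true, kb = true : all of S1 qualifies, recurse into c0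
        have e0 : ((S.filter fun p => !p.1.testBit b).filter
            fun p => decide ((p.1 ^^^ tq) % 2 ^ (b+1) < k % 2 ^ (b+1)))
            = ((S.filter fun p => !p.1.testBit b).filter
                fun p => decide ((p.1 ^^^ tq) % 2 ^ b < k % 2 ^ b)) :=
          List.filter_congr (fun p hp => by rw [hcond p, hmem0 p hp, htb, hkb]; simp)
        have e1 : ((S.filter fun p => p.1.testBit b).filter
            fun p => decide ((p.1 ^^^ tq) % 2 ^ (b+1) < k % 2 ^ (b+1)))
            = (S.filter fun p => p.1.testBit b) :=
          List.filter_eq_self.mpr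
            (fun p hp => by rw [hcond p, hmem1 p hp, htb, hkb]; simp)
        rw [hRHS, e0, e1, pxQuery]
        simp only [htb, hkb, if_true, ite_true]
        rw [ih h0, inv_rootMn h1, pxOptMin_comm]

-- ---- prefix-xor and fold bridge lemmas ----
theorem pxs_getD_zero (a : List Int) : pxv a 0 = 0 := by
  cases a <;> simp [pxv, pxs, List.scanl]

theorem pxv_eq_foldl (a : List Int) (j : Nat) (h : j ≤ a.length) :
    pxv a j = (a.take j).foldl (fun x y => PySem.Int.bxor x y) 0 := by
  have hlen : j < (pxs a).length := by simp [pxs, List.length_scanl]; omega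
  rw [pxv, List.getD_eq_getElem _ _ hlen]
  exact List.getElem_scanl hlen

theorem pxv_succ (a : List Int) (j : Nat) (h : j < a.length) :
    pxv a (j + 1) = PySem.Int.bxor (pxv a j) (a.getD j 0) := by
  rw [pxv_eq_foldl a j (by omega), pxv_eq_foldl a (j+1) (by omega), List.take_succ]
  have : a[j]?.toList = [a[j]] := by simp [List.getElem?_eq_getElem h]
  rw [this, List.foldl_append, List.getD_eq_getElem _ _ h]
  simp

theorem pxv_range {a : List Int} (hDom : ∀ x ∈ a, -2 ^ 31 ≤ x ∧ x ≤ 2 ^ 31) (j : Nat) :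
    -2 ^ 32 ≤ pxv a j ∧ pxv a j < 2 ^ 32 := by
  induction j with
  | zero => rw [pxs_getD_zero]; norm_num
  | succ j ih =>
    by_cases hj : j < a.length
    · rw [pxv_succ a j hj]
      refine bxor_range ih ?_
      have hm : a.getD j 0 ∈ a := by
        rw [List.getD_eq_getElem _ _ hj]; exact List.getElem_mem hj
      have := hDom _ hm
      constructor <;> omega
    · have hlen : (pxs a).length ≤ j + 1 := by simp [pxs, List.length_scanl]; omega
      rw [pxv, List.getD_eq_default _ _ hlen]; norm_num

theorem foldl_max_shift (l : List Nat) (v : Nat → Nat) (m0 : Nat) :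
    l.foldl (fun m x => max m (v x)) m0 = max m0 (l.foldl (fun m x => max m (v x)) 0) := by
  induction l generalizing m0 with
  | nil => simp
  | cons x l ih => simp only [List.foldl_cons]; rw [ih (max m0 (v x)), ih (max 0 (v x))]; omega

theorem foldl_max_sup (len : Nat) (v : Nat → Nat) :
    (List.range len).foldl (fun m x => max m (v x)) 0 = (Finset.range len).sup v := by
  induction len with
  | zero => simp
  | succ n ih =>
    rw [List.range_succ, List.foldl_append, Finset.range_add_one, Finset.sup_insert, ih]
    simp only [List.foldl_cons, List.foldl_nil]
    rw [show ((Finset.range n).sup v ⊔ v n) = max ((Finset.range n).sup v) (v n) from rfl]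
    omega

theorem foldl_ifmax_bridge (l : List Nat) (c : Nat → Bool) (w : Nat → Nat) (m0 : Int) (h : 0 ≤ m0) :
    l.foldl (fun m x => if c x then max m ((w x : Nat) : Int) else m) m0
      = max m0 ((l.foldl (fun m x => max m (if c x then w x else 0)) 0 : Nat) : Int) := by
  induction l generalizing m0 with
  | nil => simp; omega
  | cons x l ih =>
    simp only [List.foldl_cons]
    rcases hc : c x <;> simp only [hc, if_true, if_false, Bool.false_eq_true, ite_false, ite_true]
    · rw [ih m0 h, foldl_max_shift l _ (max 0 0)]
      push_cast; omega
    · rw [ih (max m0 (w x)) (by omega), foldl_max_shift l _ (max 0 (w x))]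
      push_cast; omega

theorem foldl_body_bridge (l : List Nat) (body : Int → Nat → Int) (V : Nat → Nat) (m0 : Int)
    (h0 : 0 ≤ m0) (hb : ∀ (m : Int) i, 0 ≤ m → i ∈ l → body m i = max m ((V i : Nat) : Int)) :
    l.foldl body m0 = max m0 ((l.foldl (fun m i => max m (V i)) 0 : Nat) : Int) := by
  induction l generalizing m0 with
  | nil => simp; omega
  | cons x l ih =>
    simp only [List.foldl_cons]
    rw [hb m0 x h0 (by simp), ih (max m0 ((V x : Nat) : Int)) (by omega)
        (fun m i hm hi => hb m i hm (by simp [hi])),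
      foldl_max_shift l V (max 0 (V x))]
    push_cast
    omega

-- ---- B side ----
theorem sKeys_succ (a : List Int) (m : Nat) :
    sKeys a (m + 1) = sKeys a m ++ [(keyOf a m, m)] := by
  simp [sKeys, List.range_succ]

theorem query_minGood {a : List Int} {K : Int} (hDom : pxBounded a)
    (hK : -2 ^ 31 ≤ K ∧ K ≤ 2 ^ 31) (j : Nat) {root : PXTrie}
    (hInv : PXInv 33 (sKeys a j) root) :
    pxQuery root (keyOf a j ^^^ 2 ^ 32) (K + 2 ^ 32).toNat 33 = minGood a K j := by
  rw [query_correct hInv]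
  unfold sKeys
  rw [List.filter_map, List.map_map]
  have hid : (Prod.snd ∘ fun i => ((keyOf a i, i) : Nat × Nat)) = id := rfl
  rw [hid, List.map_id]
  unfold minGood
  congr 1
  refine List.filter_congr fun i _ => ?_
  show decide ((keyOf a i ^^^ (keyOf a j ^^^ 2 ^ 32)) % 2 ^ 33 < (K + 2 ^ 32).toNat % 2 ^ 33)
      = goodb a K i j
  have hvi := pxv_range hDom i
  have hvj := pxv_range hDom j
  have hki : keyOf a i < 2 ^ 33 := by unfold keyOf; omega
  have hkj : keyOf a j < 2 ^ 33 := by unfold keyOf; omega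
  have ht : keyOf a j ^^^ 2 ^ 32 < 2 ^ 33 :=
    Nat.xor_lt_two_pow hkj (by norm_num)
  have hx : keyOf a i ^^^ (keyOf a j ^^^ 2 ^ 32) < 2 ^ 33 := Nat.xor_lt_two_pow hki ht
  have hb : (K + 2 ^ 32).toNat < 2 ^ 33 := by omega
  rw [Nat.mod_eq_of_lt hx, Nat.mod_eq_of_lt hb]
  unfold goodb
  rw [decide_eq_decide]
  unfold keyOf
  rw [key_cond_iff hvi hvj hK, PySem.Int.bxor_comm]

def gStep (a : List Int) (K : Int) : Int → Nat → Int := fun m j =>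
  match minGood a K j with
  | some i => if (j : Int) - (i : Int) > m then (j : Int) - (i : Int) else m
  | none => m

theorem gStep_eq_max (a : List Int) (K : Int) (m : Int) (j : Nat) (hm : 0 ≤ m) :
    gStep a K m j = max m ((vj a K j : Nat) : Int) := by
  unfold gStep vj
  rcases h : minGood a K j with _ | i
  · simp; omega
  · unfold minGood at h
    rw [List.min?_eq_some_iff] at h
    have hij : i < j := by
      have := h.1
      rw [List.mem_filter, List.mem_range] at this
      exact this.1
    have hred : (match some i with
        | some i => if (j : Int) - (i : Int) > m then (j : Int) - (i : Int) else m
        | none => m) = if (j : Int) - (i : Int) > m then (j : Int) - (i : Int) else m := rfl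
    rw [hred]
    have : ((j - i : Nat) : Int) = (j : Int) - (i : Int) := by omega
    rw [this]
    omega

theorem bstep_loop (a : List Int) (K : Int) (hDom : pxBounded a)
    (hK : -2 ^ 31 ≤ K ∧ K ≤ 2 ^ 31) :
    ∀ (rest done : List Int) (root : PXTrie) (ans : Int),
      a = done ++ rest →
      PXInv 33 (sKeys a (done.length + 1)) root →
      (rest.foldl
        (fun (st : PXTrie × Int × Nat × Int) v =>
          let px := PySem.Int.bxor st.2.1 v
          let key := (px + 4294967296).toNat
          let j := st.2.2.1 + 1
          let ans :=
            match pxQuery st.1 (key ^^^ 4294967296) ((K + 4294967296).toNat) 33 with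
            | some i => if (j : Int) - (i : Int) > st.2.2.2 then (j : Int) - (i : Int) else st.2.2.2
            | none => st.2.2.2
          (pxInsert st.1 key 33 j, px, j, ans))
        (root, pxv a done.length, done.length, ans)).2.2.2
      = ((List.range rest.length).map fun t => done.length + 1 + t).foldl (gStep a K) ans := by
  intro rest
  induction rest with
  | nil => intro done root ans _ _; rfl
  | cons v rest ih =>
    intro done root ans ha hInv
    have hlen : done.length < a.length := by subst ha; simp
    have hget : a.getD done.length 0 = v := by
      subst ha
      rw [List.getD_append_right done (v :: rest) 0 done.length (le_refl _)]
      simp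
    have hpx : PySem.Int.bxor (pxv a done.length) v = pxv a (done.length + 1) := by
      rw [pxv_succ a done.length hlen, hget]
    have hkey : (pxv a (done.length + 1) + 4294967296).toNat = keyOf a (done.length + 1) := by
      unfold keyOf; norm_num
    have hq : pxQuery root (keyOf a (done.length + 1) ^^^ 4294967296) ((K + 4294967296).toNat) 33
        = minGood a K (done.length + 1) := by
      have := query_minGood hDom hK (done.length + 1) hInv
      norm_num at this ⊢
      exact this
    have hInv' : PXInv 33 (sKeys a (done.length + 1 + 1))
        (pxInsert root (keyOf a (done.length + 1)) 33 (done.length + 1)) := by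
      rw [sKeys_succ]
      exact inv_insert hInv _ _
    have hstep := ih (done ++ [v])
      (pxInsert root (keyOf a (done.length + 1)) 33 (done.length + 1))
      (gStep a K ans (done.length + 1))
      (by simpa using ha) (by simpa using hInv')
    simp only [List.foldl_cons, hpx, hkey, hq]
    simp only [List.length_append, List.length_cons, List.length_nil] at hstep
    have hstate : (match minGood a K (done.length + 1) with
        | some i => if ((done.length + 1 : Nat) : Int) - (i : Int) > ans
                    then ((done.length + 1 : Nat) : Int) - (i : Int) else ans
        | none => ans) = gStep a K ans (done.length + 1) := rfl
    rw [hstate]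
    rw [hstep]
    rw [show (v :: rest).length = rest.length + 1 from rfl,
      List.range_succ_eq_map, List.map_cons, List.foldl_cons, List.map_map]
    simp only [Nat.zero_add, Nat.add_zero]
    congr 1
    refine List.map_congr_left fun t _ => ?_
    show done.length + 1 + 1 + t = done.length + 1 + (t + 1)
    omega

theorem vj_sup (a : List Int) (K : Int) (j : Nat) :
    vj a K j = (Finset.range j).sup fun i => if goodb a K i j then j - i else 0 := by
  unfold vj minGood
  rcases h : ((List.range j).filter (fun i => goodb a K i j)).min? with _ | i0
  · rw [List.min?_eq_none_iff, List.filter_eq_nil_iff] at h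
    symm
    rw [← Nat.le_zero]
    refine Finset.sup_le fun i hi => ?_
    rw [if_neg (by simpa using h i (by simpa using hi))]
  · rw [List.min?_eq_some_iff] at h
    obtain ⟨hmem, hmin⟩ := h
    rw [List.mem_filter, List.mem_range] at hmem
    refine le_antisymm ?_ (Finset.sup_le fun i hi => ?_)
    · show j - i0 ≤ _
      have := Finset.le_sup (f := fun i => if goodb a K i j then j - i else 0)
        (Finset.mem_range.mpr hmem.1)
      simpa [hmem.2] using this
    · show (if goodb a K i j = true then j - i else 0) ≤ j - i0
      rcases hg : goodb a K i j
      · simp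
      · have hle := hmin i (List.mem_filter.mpr ⟨List.mem_range.mpr (Finset.mem_range.mp hi), hg⟩)
        simp only [if_true]
        omega

theorem supB_eq_spec (a : List Int) (K : Int) :
    (Finset.range a.length).sup (fun t => vj a K (1 + t)) = specN a K := by
  unfold specN
  refine le_antisymm (Finset.sup_le fun t ht => ?_) (Finset.sup_le fun j hj => ?_)
  · rw [vj_sup]
    exact Finset.le_sup
      (f := fun j => (Finset.range j).sup fun i => if goodb a K i j then j - i else 0)
      (Finset.mem_range.mpr (by have := Finset.mem_range.mp ht; omega))
  · cases j with
    | zero => simp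
    | succ t =>
      have : (Finset.range (t+1)).sup (fun i => if goodb a K i (t+1) then t+1-i else 0)
          = vj a K (1 + t) := by rw [Nat.add_comm 1 t, vj_sup]
      rw [this]
      exact Finset.le_sup (f := fun t => vj a K (1 + t))
        (Finset.mem_range.mpr (by have := Finset.mem_range.mp hj; omega))

theorem alt_eq_spec (a : List Int) (K : Int) (hDom : pxBounded a)
    (hK : -2 ^ 31 ≤ K ∧ K ≤ 2 ^ 31) :
    longest_subarray_xor_less_than_k_alt a K = ((specN a K : Nat) : Int) := by
  unfold longest_subarray_xor_less_than_k_alt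
  have hk0 : keyOf a 0 = 4294967296 := by
    unfold keyOf
    rw [pxs_getD_zero]
    rfl
  have hnil : PXInv 33 ([] : List (Nat × Nat)) PXTrie.nil := rfl
  have h0 : PXInv 33 (sKeys a 1) (pxInsert PXTrie.nil 4294967296 33 0) := by
    have := inv_insert hnil (keyOf a 0) 0
    rw [hk0] at this
    simpa [sKeys, List.range_succ, hk0] using this
  have hloop := bstep_loop a K hDom hK a [] (pxInsert PXTrie.nil 4294967296 33 0) 0
    (by simp) (by simpa using h0)
  simp only [List.length_nil, Nat.zero_add] at hloop
  rw [pxs_getD_zero] at hloop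
  rw [hloop, List.foldl_map,
    foldl_body_bridge (List.range a.length) (fun m t => gStep a K m (1 + t))
      (fun t => vj a K (1 + t)) 0 le_rfl
      (fun m t hm _ => gStep_eq_max a K m (1 + t) hm),
    foldl_max_sup, supB_eq_spec]
  omega

-- ---- A side ----
theorem pxs_take_one (a : List Int) : (pxs a).take 1 = [0] := by
  cases a <;> simp [pxs]

theorem pxs_length (a : List Int) : (pxs a).length = a.length + 1 := by
  simp [pxs, List.length_scanl]

theorem prefix_build_aux (a : List Int) : ∀ m, m ≤ a.length →
    (List.range m).foldl
      (fun px (i : Nat) =>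
        PySem.List.pySetD px ((i : Int) + 1)
          (PySem.Int.bxor (PySem.List.pyGetD px (i : Int) 0) (PySem.List.pyGetD a (i : Int) 0)))
      (List.replicate (a.length + 1) 0)
    = (pxs a).take (m + 1) ++ List.replicate (a.length - m) 0 := by
  intro m
  induction m with
  | zero =>
    intro _
    rw [List.range_zero, List.foldl_nil, pxs_take_one]
    simp [List.replicate_succ]
  | succ m ih =>
    intro hm
    rw [List.range_succ, List.foldl_append, ih (by omega), List.foldl_cons, List.foldl_nil]
    have htk : ((pxs a).take (m + 1)).length = m + 1 := by
      rw [List.length_take, pxs_length]; omega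
    have hget1 : PySem.List.pyGetD ((pxs a).take (m + 1) ++ List.replicate (a.length - m) 0)
        ((m : Nat) : Int) 0 = pxv a m := by
      rw [PySem.List.pyGetD_natCast, List.getD_append _ _ _ _ (by omega),
        List.getD_eq_getElem _ _ (by omega), List.getElem_take,
        ← List.getD_eq_getElem _ _ (by rw [pxs_length]; omega)]
      rfl
    have hget2 : PySem.List.pyGetD a ((m : Nat) : Int) 0 = a.getD m 0 := by
      rw [PySem.List.pyGetD_natCast]
    rw [hget1, hget2]
    have hv : PySem.Int.bxor (pxv a m) (a.getD m 0) = pxv a (m + 1) :=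
      (pxv_succ a m (by omega)).symm
    rw [hv]
    have hcast : ((m : Nat) : Int) + 1 = (((m + 1 : Nat)) : Int) := by push_cast; ring
    rw [hcast, PySem.List.pySetD_natCast]
    rw [List.set_append_right (m + 1) (pxv a (m + 1)) (by omega)]
    rw [htk, Nat.sub_self]
    rw [show a.length - m = (a.length - (m + 1)) + 1 by omega, List.replicate_succ,
      List.set_cons_zero]
    have hexp : (pxs a).take (m + 1 + 1) = (pxs a).take (m + 1) ++ [pxv a (m + 1)] := by
      have hidx : m + 1 < (pxs a).length := by rw [pxs_length]; omega
      rw [List.take_add_one]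
      congr 1
      rw [List.getElem?_eq_getElem hidx]
      rw [show pxv a (m + 1) = (pxs a)[m + 1]'hidx from List.getD_eq_getElem _ _ hidx]
      rfl
    rw [hexp, List.append_assoc, List.singleton_append]

theorem prefix_build (a : List Int) :
    (PySem.List.pyRange 0 ((a.length : Nat) : Int)).foldl
      (fun px i =>
        PySem.List.pySetD px (i + 1)
          (PySem.Int.bxor (PySem.List.pyGetD px i 0) (PySem.List.pyGetD a i 0)))
      (List.replicate (a.length + 1) 0) = pxs a := by
  rw [PySem.List.pyRange_zero_natCast, List.foldl_map, prefix_build_aux a a.length (le_refl _)]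
  rw [Nat.sub_self, List.replicate_zero, List.append_nil, List.take_of_length_le (by rw [pxs_length])]

theorem supA_eq_spec (a : List Int) (K : Int) :
    (Finset.range a.length).sup
      (fun i => (Finset.range (a.length - i)).sup
        fun k => if goodb a K i (i + 1 + k) then k + 1 else 0) = specN a K := by
  unfold specN
  refine le_antisymm (Finset.sup_le fun i hi => Finset.sup_le fun k hk => ?_)
    (Finset.sup_le fun j hj => Finset.sup_le fun i hij => ?_)
  · have hi' := Finset.mem_range.mp hi
    have hk' := Finset.mem_range.mp hk
    refine le_trans ?_ (Finset.le_sup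
      (f := fun j => (Finset.range j).sup fun i => if goodb a K i j then j - i else 0)
      (Finset.mem_range.mpr (show i + 1 + k < a.length + 1 by omega)))
    refine le_trans ?_ (Finset.le_sup
      (f := fun i' => if goodb a K i' (i + 1 + k) then i + 1 + k - i' else 0)
      (Finset.mem_range.mpr (show i < i + 1 + k by omega)))
    rcases hg : goodb a K i (i + 1 + k) <;> simp [hg] <;> omega
  · have hj' := Finset.mem_range.mp hj
    have hij' := Finset.mem_range.mp hij
    refine le_trans ?_ (Finset.le_sup
      (f := fun i => (Finset.range (a.length - i)).sup
        fun k => if goodb a K i (i + 1 + k) then k + 1 else 0)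
      (Finset.mem_range.mpr (show i < a.length by omega)))
    refine le_trans ?_ (Finset.le_sup
      (f := fun k => if goodb a K i (i + 1 + k) then k + 1 else 0)
      (Finset.mem_range.mpr (show j - i - 1 < a.length - i by omega)))
    show (if goodb a K i j = true then j - i else 0)
        ≤ if goodb a K i (i + 1 + (j - i - 1)) = true then (j - i - 1) + 1 else 0
    rw [show i + 1 + (j - i - 1) = j by omega]
    rcases hg : goodb a K i j <;> simp [hg] <;> omega

theorem orig_eq_spec (a : List Int) (K : Int) :
    longest_subarray_xor_less_than_k a K = ((specN a K : Nat) : Int) := by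
  have hA : longest_subarray_xor_less_than_k a K =
      (PySem.List.pyRange 0 ((a.length : Nat) : Int)).foldl
        (fun max_len i =>
          (PySem.List.pyRange (i + 1) (((a.length : Nat) : Int) + 1)).foldl
            (fun max_len j =>
              if PySem.Int.bxor
                  (PySem.List.pyGetD
                    ((PySem.List.pyRange 0 ((a.length : Nat) : Int)).foldl
                      (fun px i =>
                        PySem.List.pySetD px (i + 1)
                          (PySem.Int.bxor (PySem.List.pyGetD px i 0) (PySem.List.pyGetD a i 0)))
                      (List.replicate (((a.length : Nat) : Int) + 1).toNat 0)) j 0)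
                  (PySem.List.pyGetD
                    ((PySem.List.pyRange 0 ((a.length : Nat) : Int)).foldl
                      (fun px i =>
                        PySem.List.pySetD px (i + 1)
                          (PySem.Int.bxor (PySem.List.pyGetD px i 0) (PySem.List.pyGetD a i 0)))
                      (List.replicate (((a.length : Nat) : Int) + 1).toNat 0)) i 0) < K then
                max max_len (j - i)
              else max_len)
            max_len)
        0 := rfl
  rw [hA, show (((a.length : Nat) : Int) + 1).toNat = a.length + 1 by omega, prefix_build a]
  rw [PySem.List.pyRange_zero_natCast, List.foldl_map]
  have hbody : ∀ (m : Int) (i : Nat), 0 ≤ m → i ∈ List.range a.length →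
      (PySem.List.pyRange (((i : Nat) : Int) + 1) (((a.length : Nat) : Int) + 1)).foldl
        (fun max_len j =>
          if PySem.Int.bxor (PySem.List.pyGetD (pxs a) j 0) (PySem.List.pyGetD (pxs a) ((i : Nat) : Int) 0) < K
          then max max_len (j - ((i : Nat) : Int)) else max_len) m
      = max m (((Finset.range (a.length - i)).sup
          (fun k => if goodb a K i (i + 1 + k) then k + 1 else 0) : Nat) : Int) := by
    intro m i hm hi
    have hi' : i < a.length := List.mem_range.mp hi
    rw [PySem.List.pyRange_of_pos _ _ (by norm_num : (0 : Int) < 1)]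
    rw [if_pos (by omega : ((i : Nat) : Int) + 1 < ((a.length : Nat) : Int) + 1)]
    rw [show ((((a.length : Nat) : Int) + 1) - (((i : Nat) : Int) + 1) + 1 - 1) / 1
        = ((a.length - i : Nat) : Int) by rw [Int.ediv_one]; push_cast; omega]
    rw [Int.toNat_natCast, List.foldl_map]
    rw [PySem.List.foldl_congr_mem _ _
      (fun (acc : Int) (k : Nat) =>
        if goodb a K i (i + 1 + k) then max acc (((k + 1 : Nat)) : Int) else acc) m
      (by
        intro acc k _
        rw [show (((i : Nat) : Int) + 1 + 1 * ((k : Nat) : Int)) = (((i + 1 + k : Nat)) : Int) by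
          push_cast; ring]
        rw [PySem.List.pyGetD_natCast, PySem.List.pyGetD_natCast]
        show (if PySem.Int.bxor (pxv a (i + 1 + k)) (pxv a i) < K
            then max acc (((i + 1 + k : Nat) : Int) - ((i : Nat) : Int)) else acc)
          = if goodb a K i (i + 1 + k) = true then max acc (((k + 1 : Nat)) : Int) else acc
        by_cases hc : PySem.Int.bxor (pxv a (i + 1 + k)) (pxv a i) < K
        · rw [if_pos hc, if_pos (by simp [goodb, hc])]
          congr 1
          omega
        · rw [if_neg hc, if_neg (by simp [goodb, hc])])]
    rw [foldl_ifmax_bridge _ _ _ m hm, foldl_max_sup]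
  rw [foldl_body_bridge (List.range a.length) _
    (fun i => (Finset.range (a.length - i)).sup
      fun k => if goodb a K i (i + 1 + k) then k + 1 else 0) 0 le_rfl hbody]
  rw [foldl_max_sup, supA_eq_spec]
  omega

-- ===== VERDICT (by name: the statement is the Claim_ definition above) =====
theorem longest_subarray_xor_less_than_k_spec : Claim_equal_longest_subarray_xor_less_than_k := by
  intro a K hDom
  unfold Dom_longest_subarray_xor_less_than_k at hDom
  rw [Bool.and_eq_true] at hDom
  have hDom' : pxBounded a := by
    intro x hx
    have := List.all_eq_true.mp hDom.1 x hx
    simpa [pvDomInt] using of_decide_eq_true this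
  have hK : -2 ^ 31 ≤ K ∧ K ≤ 2 ^ 31 := by
    have := hDom.2
    simpa [pvDomInt] using of_decide_eq_true this
  unfold Spec_longest_subarray_xor_less_than_k
  rw [orig_eq_spec a K, alt_eq_spec a K hDom' hK]
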